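-- pv_equiv track=rewrite | github.com/Live-Coding-Test/Algorithm-study | live8/test83/문제3/박희경.py | solution
-- ===== SOURCE A (Python) =====
-- def solution(lands):
--     dp = lands[0]
--
--     for i in range(1, len(lands)):
--         new_dp = [0] * 4
--         for j in range(4):
--             # 같은 열이 아닌 요소 중 가장 큰 값과 현재 값과 더하기 (누적해서)
--             new_dp[j] = lands[i][j] + max(dp[k] for k in range(4) if k != j)
--         dp = new_dp
--
--     return max(dp)
-- ===== SOURCE B (Python) =====
-- def solution(lands):
--     dp = lands[0]
--     for row in lands[1:]:
--         # one scan of dp: top value m1 (first argmax 'arg') and runner-up m2 = max over columns != arg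
--         if dp[1] > dp[0]:
--             m1, m2, arg = dp[1], dp[0], 1
--         else:
--             m1, m2, arg = dp[0], dp[1], 0
--         for k in (2, 3):
--             if dp[k] > m1:
--                 m1, m2, arg = dp[k], m1, k
--             elif dp[k] > m2:
--                 m2 = dp[k]
--         dp = [row[j] + (m2 if j == arg else m1) for j in range(4)]
--     return max(dp)
-- ===== Notes on version B (the rewrite author's own statement) =====
-- stated objective: alternative
-- what changed: Per row, A recomputes max(dp[k] for k != j) separately for each of the 4 columns (nested 4x3 scan); B makes one scan of dp to find the top value, its first index and the runner-up, then builds the new row from those two precomputed values.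
import Mathlib
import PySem

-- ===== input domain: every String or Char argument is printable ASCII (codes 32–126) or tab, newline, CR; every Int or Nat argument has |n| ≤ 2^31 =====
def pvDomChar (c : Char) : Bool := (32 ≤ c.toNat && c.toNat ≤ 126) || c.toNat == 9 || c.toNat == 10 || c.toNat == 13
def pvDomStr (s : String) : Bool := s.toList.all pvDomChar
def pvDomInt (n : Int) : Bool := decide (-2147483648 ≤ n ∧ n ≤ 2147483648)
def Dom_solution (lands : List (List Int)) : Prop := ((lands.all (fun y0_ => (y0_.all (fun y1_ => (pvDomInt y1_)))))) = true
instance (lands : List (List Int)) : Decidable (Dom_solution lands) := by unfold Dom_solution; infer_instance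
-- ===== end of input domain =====

-- B replaces A's per-column max-over-other-columns (4×3 comparisons per row) by one top-two/argmax
-- scan of dp per row; return value only, neither program mutates its input.

-- ===== PORT A =====
-- max(xs) of a nonempty list (Pre_ guarantees nonemptiness where A calls it)
def pyMax1 (xs : List Int) : Int :=
  match xs with
  | [] => 0
  | h :: t => t.foldl max h

-- max(dp[k] for k in range(4) if k != j)
def maxExcept (dp : List Int) (j : Int) : Int :=
  pyMax1 (((PySem.List.pyRange 0 4 1).filter (fun k => decide (k ≠ j))).map
    (fun k => PySem.List.pyGetD dp k 0))

def solution (lands : List (List Int)) : Int :=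
  let dp0 := PySem.List.pyGetD lands 0 []
  let dp := (PySem.List.pyRange 1 (lands.length : Int) 1).foldl
    (fun dp i =>
      (PySem.List.pyRange 0 4 1).map
        (fun j => PySem.List.pyGetD (PySem.List.pyGetD lands i []) j 0 + maxExcept dp j))
    dp0
  pyMax1 dp

-- ===== PORT B =====
-- the single scan "if dp[1] > dp[0] … ; for k in (2, 3): …" maintaining (m1, m2, arg)
def topTwo (dp : List Int) : Int × Int × Int :=
  let init : Int × Int × Int :=
    if PySem.List.pyGetD dp 1 0 > PySem.List.pyGetD dp 0 0 then
      (PySem.List.pyGetD dp 1 0, PySem.List.pyGetD dp 0 0, 1)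
    else
      (PySem.List.pyGetD dp 0 0, PySem.List.pyGetD dp 1 0, 0)
  ([2, 3] : List Int).foldl
    (fun s k =>
      if PySem.List.pyGetD dp k 0 > s.1 then (PySem.List.pyGetD dp k 0, s.1, k)
      else if PySem.List.pyGetD dp k 0 > s.2.1 then (s.1, PySem.List.pyGetD dp k 0, s.2.2)
      else s)
    init

def solution_alt (lands : List (List Int)) : Int :=
  let dp0 := PySem.List.pyGetD lands 0 []
  let dp := (lands.drop 1).foldl
    (fun dp row =>
      let t := topTwo dp
      (PySem.List.pyRange 0 4 1).map
        (fun j => PySem.List.pyGetD row j 0 + if j = t.2.2 then t.2.1 else t.1))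
    dp0
  pyMax1 dp

-- ===== PRECONDITION & SPEC =====
-- exactly the inputs on which the Python A returns (otherwise IndexError / max of empty)
def Pre_solution (lands : List (List Int)) : Prop :=
  lands ≠ [] ∧ (lands.length = 1 → lands.getD 0 [] ≠ []) ∧
    (2 ≤ lands.length → ∀ row ∈ lands, 4 ≤ row.length)
instance (lands : List (List Int)) : Decidable (Pre_solution lands) := by
  unfold Pre_solution; infer_instance
def pvWitness_solution : List (List Int) := [[1, 2, 3, 4], [4, 3, 2, 1]]

def Spec_solution (lands : List (List Int)) (out : Int) : Prop := out = solution_alt lands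
instance (lands : List (List Int)) (out : Int) : Decidable (Spec_solution lands out) := by
  unfold Spec_solution; infer_instance

-- ===== CLAIM (what is proved, stated in full; the proofs are below) =====
def Claim_equal_solution : Prop := ∀ (lands : List (List Int)), Dom_solution lands → Pre_solution lands → Spec_solution lands (solution lands)

-- ===== LEMMAS AND PROOFS =====

-- per-row step functions agree on every dp and row
set_option maxHeartbeats 1000000 in
lemma step_eq (dp row : List Int) :
    ((PySem.List.pyRange 0 4 1).map
      (fun j => PySem.List.pyGetD row j 0 +
        (if j = (topTwo dp).2.2 then (topTwo dp).2.1 else (topTwo dp).1))) =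
    ((PySem.List.pyRange 0 4 1).map
      (fun j => PySem.List.pyGetD row j 0 + maxExcept dp j)) := by
  have h4 : PySem.List.pyRange 0 4 1 = [0, 1, 2, 3] := rfl
  have e0 : maxExcept dp 0 = max (max (PySem.List.pyGetD dp 1 0) (PySem.List.pyGetD dp 2 0)) (PySem.List.pyGetD dp 3 0) := rfl
  have e1 : maxExcept dp 1 = max (max (PySem.List.pyGetD dp 0 0) (PySem.List.pyGetD dp 2 0)) (PySem.List.pyGetD dp 3 0) := rfl
  have e2 : maxExcept dp 2 = max (max (PySem.List.pyGetD dp 0 0) (PySem.List.pyGetD dp 1 0)) (PySem.List.pyGetD dp 3 0) := rfl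
  have e3 : maxExcept dp 3 = max (max (PySem.List.pyGetD dp 0 0) (PySem.List.pyGetD dp 1 0)) (PySem.List.pyGetD dp 2 0) := rfl
  simp only [h4, List.map, e0, e1, e2, e3, topTwo, List.foldl]
  clear e0 e1 e2 e3 h4
  generalize PySem.List.pyGetD dp 0 0 = a
  generalize PySem.List.pyGetD dp 1 0 = b
  generalize PySem.List.pyGetD dp 2 0 = c
  generalize PySem.List.pyGetD dp 3 0 = d
  by_cases hb : b > a
  · rw [if_pos hb]; try dsimp only
    by_cases hc : c > b
    · rw [if_pos hc]; try dsimp only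
      by_cases hd : d > c
      · rw [if_pos hd]; try dsimp only
        simp only [List.cons.injEq, Int.reduceEq, ite_true, ite_false, and_true]; omega
      · rw [if_neg hd]; try dsimp only
        by_cases hd2 : d > b
        · rw [if_pos hd2]; try dsimp only
          simp only [List.cons.injEq, Int.reduceEq, ite_true, ite_false, and_true]; omega
        · rw [if_neg hd2]; try dsimp only
          simp only [List.cons.injEq, Int.reduceEq, ite_true, ite_false, and_true]; omega
    · rw [if_neg hc]; try dsimp only
      by_cases hc2 : c > a
      · rw [if_pos hc2]; try dsimp only
        by_cases hd : d > b
        · rw [if_pos hd]; try dsimp only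
          simp only [List.cons.injEq, Int.reduceEq, ite_true, ite_false, and_true]; omega
        · rw [if_neg hd]; try dsimp only
          by_cases hd2 : d > c
          · rw [if_pos hd2]; try dsimp only
            simp only [List.cons.injEq, Int.reduceEq, ite_true, ite_false, and_true]; omega
          · rw [if_neg hd2]; try dsimp only
            simp only [List.cons.injEq, Int.reduceEq, ite_true, ite_false, and_true]; omega
      · rw [if_neg hc2]; try dsimp only
        by_cases hd : d > b
        · rw [if_pos hd]; try dsimp only
          simp only [List.cons.injEq, Int.reduceEq, ite_true, ite_false, and_true]; omega
        · rw [if_neg hd]; try dsimp only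
          by_cases hd2 : d > a
          · rw [if_pos hd2]; try dsimp only
            simp only [List.cons.injEq, Int.reduceEq, ite_true, ite_false, and_true]; omega
          · rw [if_neg hd2]; try dsimp only
            simp only [List.cons.injEq, Int.reduceEq, ite_true, ite_false, and_true]; omega
  · rw [if_neg hb]; try dsimp only
    by_cases hc : c > a
    · rw [if_pos hc]; try dsimp only
      by_cases hd : d > c
      · rw [if_pos hd]; try dsimp only
        simp only [List.cons.injEq, Int.reduceEq, ite_true, ite_false, and_true]; omega
      · rw [if_neg hd]; try dsimp only
        by_cases hd2 : d > a
        · rw [if_pos hd2]; try dsimp only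
          simp only [List.cons.injEq, Int.reduceEq, ite_true, ite_false, and_true]; omega
        · rw [if_neg hd2]; try dsimp only
          simp only [List.cons.injEq, Int.reduceEq, ite_true, ite_false, and_true]; omega
    · rw [if_neg hc]; try dsimp only
      by_cases hc2 : c > b
      · rw [if_pos hc2]; try dsimp only
        by_cases hd : d > a
        · rw [if_pos hd]; try dsimp only
          simp only [List.cons.injEq, Int.reduceEq, ite_true, ite_false, and_true]; omega
        · rw [if_neg hd]; try dsimp only
          by_cases hd2 : d > c
          · rw [if_pos hd2]; try dsimp only
            simp only [List.cons.injEq, Int.reduceEq, ite_true, ite_false, and_true]; omega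
          · rw [if_neg hd2]; try dsimp only
            simp only [List.cons.injEq, Int.reduceEq, ite_true, ite_false, and_true]; omega
      · rw [if_neg hc2]; try dsimp only
        by_cases hd : d > a
        · rw [if_pos hd]; try dsimp only
          simp only [List.cons.injEq, Int.reduceEq, ite_true, ite_false, and_true]; omega
        · rw [if_neg hd]; try dsimp only
          by_cases hd2 : d > b
          · rw [if_pos hd2]; try dsimp only
            simp only [List.cons.injEq, Int.reduceEq, ite_true, ite_false, and_true]; omega
          · rw [if_neg hd2]; try dsimp only
            simp only [List.cons.injEq, Int.reduceEq, ite_true, ite_false, and_true]; omega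

-- ===== VERDICT (by name: the statement is the Claim_ definition above) =====
theorem solution_spec : Claim_equal_solution := by
  intro lands _ _
  unfold Spec_solution solution solution_alt
  dsimp only
  rw [PySem.List.foldl_pyRange_pyGetD' lands []
    (fun dp row =>
      (PySem.List.pyRange 0 4 1).map
        (fun j => PySem.List.pyGetD row j 0 + maxExcept dp j))
    (PySem.List.pyGetD lands 0 []) (a := 1) (by norm_num)]
  congr 1
  apply PySem.List.foldl_congr_mem
  intro dp row _
  exact (step_eq dp row).symm
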